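-- pv_equiv track=rewrite | github.com/diegoforni/Algoritmos2 | practicas/tp-pm/code/main.py | createTransitionMatrix
-- ===== SOURCE A (Python) =====
-- def createTransitionMatrix(P, alphabet):
--     matrix = []
--     for i in range(len(P) + 1):
--         matrix.append([None] * len(alphabet))
--     i = 0
--     for row in range(len(P)):
--         for col in range(len(alphabet)):
--             if alphabet[col] == P[i]:
--                 matrix[row][col] = i + 1
--             else:
--                 if row == 0:
--                     matrix[row][col] = 0
--         i += 1
--     for row in range(len(P) + 1):
--         for col in range(len(alphabet)):
--             if matrix[row][col] == None:
--                 aux = P[:row] + alphabet[col]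
--                 k = len(aux) - 1
--                 if k == 0:
--                     matrix[row][col] = 0
--                 while k > 0:
--                     if aux[:k] == aux[-k:]:
--                         matrix[row][col] = k
--                         k = 0
--                     k -= 1
--                 if matrix[row][col] is None:
--                     matrix[row][col] = 0
--
--     return(matrix)
-- ===== SOURCE B (Python) =====
-- def createTransitionMatrix(P, alphabet):
--     # KMP automaton: failure (prefix) function once, then each row is filled
--     # from its fallback row in O(1) per cell.
--     m = len(P)
--     if m == 0:
--         return [[0] * len(alphabet)]
--     # pi[q] = length of the longest proper border of P[:q]
--     pi = [0] * (m + 1)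
--     k = 0
--     for q in range(1, m):
--         while k > 0 and P[q] != P[k]:
--             k = pi[k]
--         if P[q] == P[k]:
--             k += 1
--         pi[q + 1] = k
--     matrix = [[1 if c == P[0] else 0 for c in alphabet]]
--     for q in range(1, m + 1):
--         fb = matrix[pi[q]]
--         if q < m:
--             matrix.append([q + 1 if c == P[q] else fb[j]
--                            for j, c in enumerate(alphabet)])
--         else:
--             matrix.append(fb[:])
--     return matrix
-- ===== Notes on version B (the rewrite author's own statement) =====
-- stated objective: faster
-- what changed: A computes each matrix cell by a fresh quadratic longest-border scan over P[:row]+c; B computes the KMP prefix (failure) function once and fills every non-matching cell by copying from its fallback row, removing the per-cell border search entirely.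
import Mathlib
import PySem

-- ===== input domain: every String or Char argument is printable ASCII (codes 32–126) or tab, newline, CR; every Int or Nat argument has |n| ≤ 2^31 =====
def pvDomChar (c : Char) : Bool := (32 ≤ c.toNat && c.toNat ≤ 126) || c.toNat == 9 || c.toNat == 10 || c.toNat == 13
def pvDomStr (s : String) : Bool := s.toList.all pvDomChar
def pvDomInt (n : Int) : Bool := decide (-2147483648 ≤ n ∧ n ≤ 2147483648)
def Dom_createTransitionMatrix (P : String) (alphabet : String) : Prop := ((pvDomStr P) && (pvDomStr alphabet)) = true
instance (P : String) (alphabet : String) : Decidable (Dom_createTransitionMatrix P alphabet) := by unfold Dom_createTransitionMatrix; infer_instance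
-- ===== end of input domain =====

-- B replaces A's per-cell longest-border scan by the KMP prefix function computed
-- once plus fallback-row copying per cell (objective: faster).

-- ===== PORT A =====
-- A's inner 'while k > 0: if aux[:k] == aux[-k:]: …; k -= 1' loop (aux[:k] = take k,
-- aux[-k:] = drop (len-k) for 1 ≤ k ≤ len; exact per PySem.List.slice_to_natCast /
-- slice_from_neg_natCast)
def pvA_while (aux : List Char) : Nat → Option Int
  | 0 => none
  | k + 1 =>
    if aux.take (k + 1) = aux.drop (aux.length - (k + 1)) then some ((k : Int) + 1)
    else pvA_while aux k

-- one cell: phase-1 value (row < m: match ⇒ i+1; row 0 non-match ⇒ 0; else None),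
-- then phase-2 fills the None cells by the descending border scan; i = row throughout
-- phase-2 body: fill one None cell (aux = P[:row] + c; descending scan)
def pvA_fill (p : List Char) (row : Nat) (c : Char) : Int :=
  let aux := p.take row ++ [c]
  let k := aux.length - 1
  if k = 0 then (0 : Int) else (pvA_while aux k).getD 0

def pvA_cell (p : List Char) (row : Nat) (c : Char) : Int :=
  let m := p.length
  let cell : Option Int :=
    if row < m then
      if some c = p[row]? then some ((row : Int) + 1)
      else if row = 0 then some 0 else none
    else none
  match cell with
  | some v => v
  | none => pvA_fill p row c

def createTransitionMatrix (P : String) (alphabet : String) : List (List Int) :=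
  (List.range (P.toList.length + 1)).map (fun row =>
    alphabet.toList.map (fun c => pvA_cell P.toList row c))

-- ===== PORT B =====
-- B's 'while k > 0 and P[q] != P[k]: k = pi[k]' loop; fuel = the initial k (each
-- step strictly decreases k because pi[k] < k, so the fuel is never exhausted)
def pvB_desc (p : List Char) (pf : List Nat) (c : Char) : Nat → Nat → Nat
  | 0, k => k
  | fuel + 1, k =>
    if k ≠ 0 ∧ p.getD k ' ' ≠ c then pvB_desc p pf c fuel (pf.getD k 0) else k

-- one iteration of B's prefix-function loop (state (pi, k), iteration index q)
def pvB_piStep (p : List Char) (st : List Nat × Nat) (q : Nat) : List Nat × Nat :=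
  let c := p.getD q ' '
  let k0 := pvB_desc p st.1 c st.2 st.2
  let k1 := if c = p.getD k0 ' ' then k0 + 1 else k0
  (st.1.set (q + 1) k1, k1)

-- pi = [0]*(m+1); k = 0; for q in range(1, m): …
def pvB_pi (p : List Char) : List Nat :=
  ((List.range' 1 (p.length - 1)).foldl (pvB_piStep p)
    (List.replicate (p.length + 1) 0, 0)).1

-- one iteration of B's row loop: fb = matrix[pi[q]]; row from zip(alphabet, fb)
def pvB_rowStep (p al : List Char) (pf : List Nat) (mat : List (List Int)) (q : Nat) :
    List (List Int) :=
  let fb := mat.getD (pf.getD q 0) []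
  let row :=
    if q < p.length then
      (al.zip fb).map (fun cv => if cv.1 = p.getD q ' ' then ((q : Int) + 1) else cv.2)
    else fb
  mat ++ [row]

def createTransitionMatrix_alt (P : String) (alphabet : String) : List (List Int) :=
  let p := P.toList
  let al := alphabet.toList
  let m := p.length
  if m = 0 then [al.map (fun _ => (0 : Int))]
  else
    let pf := pvB_pi p
    let row0 := al.map (fun c => if c = p.getD 0 ' ' then (1 : Int) else 0)
    (List.range' 1 m).foldl (pvB_rowStep p al pf) [row0]

-- ===== PRECONDITION & SPEC =====
def Spec_createTransitionMatrix (P : String) (alphabet : String) (out : List (List Int)) : Prop := out = createTransitionMatrix_alt P alphabet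
instance (P : String) (alphabet : String) (out : List (List Int)) : Decidable (Spec_createTransitionMatrix P alphabet out) := by unfold Spec_createTransitionMatrix; infer_instance

-- ===== CLAIM (what is proved, stated in full; the proofs are below) =====
def Claim_equal_createTransitionMatrix : Prop := ∀ (P : String) (alphabet : String), Dom_createTransitionMatrix P alphabet → Spec_createTransitionMatrix P alphabet (createTransitionMatrix P alphabet)

-- ===== LEMMAS AND PROOFS =====

-- ground truth: Brd s k ⟺ the length-k prefix of s is also a suffix of s
def Brd (s : List Char) (k : Nat) : Prop := s.take k = s.drop (s.length - k)

-- mbFrom s k = the largest j ≤ k with Brd s j (0 if none); mb s = longest proper border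
def mbFrom (s : List Char) : Nat → Nat
  | 0 => 0
  | k + 1 => if s.take (k + 1) = s.drop (s.length - (k + 1)) then k + 1 else mbFrom s k

def mb (s : List Char) : Nat := mbFrom s (s.length - 1)

-- the common value of each cell: match ⇒ row+1, else longest proper border of P[:row]+c
def cellStd (p : List Char) (q : Nat) (c : Char) : Int :=
  if q < p.length ∧ some c = p[q]? then (q : Int) + 1 else (mb (p.take q ++ [c]) : Int)

lemma brd_zero (s : List Char) : Brd s 0 := by simp [Brd]

lemma mbFrom_le (s : List Char) (k : Nat) : mbFrom s k ≤ k := by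
  induction k with
  | zero => simp [mbFrom]
  | succ k ih => simp only [mbFrom]; split <;> omega

lemma brd_mbFrom (s : List Char) (k : Nat) : Brd s (mbFrom s k) := by
  induction k with
  | zero => simpa [mbFrom] using brd_zero s
  | succ k ih =>
    simp only [mbFrom]; split
    · exact ‹_›
    · exact ih

lemma le_mbFrom (s : List Char) {j k : Nat} (hj : j ≤ k) (hb : Brd s j) :
    j ≤ mbFrom s k := by
  induction k with
  | zero => omega
  | succ k ih =>
    simp only [mbFrom]; split
    · omega
    · rcases Nat.lt_or_ge j (k + 1) with h | h
      · exact ih (by omega)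
      · have hj1 : j = k + 1 := by omega
        subst hj1
        simp only [Brd] at hb
        exact absurd hb ‹¬_›

lemma mb_lt (s : List Char) (hs : s ≠ []) : mb s < s.length := by
  have h1 : mb s ≤ s.length - 1 := mbFrom_le s (s.length - 1)
  have hlen : 0 < s.length := List.length_pos_of_ne_nil hs
  omega

lemma brd_mb (s : List Char) : Brd s (mb s) := brd_mbFrom s _

lemma le_mb (s : List Char) {j : Nat} (hb : Brd s j) (hj : j < s.length) : j ≤ mb s :=
  le_mbFrom s (by omega) hb

lemma mb_short (s : List Char) (h : s.length ≤ 1) : mb s = 0 := by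
  have : s.length - 1 = 0 := by omega
  rw [mb, this, mbFrom]

-- decomposition: a border of s ++ [c] of length k+1 (k < |s|) is a border of s of
-- length k whose next character is c
lemma brd_snoc_iff (s : List Char) (c : Char) {k : Nat} (hk : k < s.length) :
    Brd (s ++ [c]) (k + 1) ↔ (Brd s k ∧ s[k]? = some c) := by
  have h1 : (s ++ [c]).take (k + 1) = s.take k ++ [s[k]] := by
    rw [List.take_append_of_le_length (by omega), List.take_add_one,
      List.getElem?_eq_getElem hk]
    rfl
  have h2 : (s ++ [c]).drop ((s ++ [c]).length - (k + 1)) = s.drop (s.length - k) ++ [c] := by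
    rw [List.length_append, List.length_singleton,
      show s.length + 1 - (k + 1) = s.length - k by omega,
      List.drop_append_of_le_length (by omega)]
  constructor
  · intro h
    rw [Brd, h1, h2] at h
    obtain ⟨ha, hb⟩ := List.append_inj h (by simp; omega)
    refine ⟨ha, ?_⟩
    rw [List.getElem?_eq_getElem hk, List.singleton_inj.mp hb]
  · rintro ⟨ha, hb⟩
    have hbc : s[k] = c := by
      rw [List.getElem?_eq_getElem hk] at hb
      exact Option.some_inj.mp hb
    rw [Brd, h1, h2, ha, hbc]

lemma brd_chain_up (s : List Char) {b j : Nat} (hb : Brd s b) (hble : b ≤ s.length)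
    (hj : Brd (s.take b) j) (hjb : j ≤ b) : Brd s j := by
  have hlen : (s.take b).length = b := by simp; omega
  have hj' : (s.take b).take j = (s.take b).drop (b - j) := by
    rw [Brd, hlen] at hj; exact hj
  have e1 : (s.take b).take j = s.take j := by rw [List.take_take]; congr 1; omega
  have e2 : (s.take b).drop (b - j) = s.drop (s.length - j) := by
    rw [Brd] at hb; rw [hb, List.drop_drop]; congr 1; omega
  rw [Brd, ← e1, hj', e2]

lemma brd_chain_down (s : List Char) {b j : Nat} (hb : Brd s b) (hble : b ≤ s.length)
    (hj : Brd s j) (hjb : j ≤ b) : Brd (s.take b) j := by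
  have hlen : (s.take b).length = b := by simp; omega
  have e1 : (s.take b).take j = s.take j := by rw [List.take_take]; congr 1; omega
  have e2 : (s.take b).drop (b - j) = s.drop (s.length - j) := by
    rw [Brd] at hb; rw [hb, List.drop_drop]; congr 1; omega
  rw [Brd, hlen, e1, e2]
  exact hj

-- THE core lemma: one fallback step computes the longest proper border of s ++ [c]
lemma mb_snoc (s : List Char) (c : Char) (hs : s ≠ []) :
    mb (s ++ [c]) = if s[mb s]? = some c then mb s + 1 else mb (s.take (mb s) ++ [c]) := by
  have hn : 0 < s.length := List.length_pos_of_ne_nil hs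
  have hblt : mb s < s.length := mb_lt s hs
  have hbb : Brd s (mb s) := brd_mb s
  have hauxlen : (s ++ [c]).length = s.length + 1 := by simp
  have hauxne : s ++ [c] ≠ [] := by simp
  split
  case isTrue hc =>
    have h1 : Brd (s ++ [c]) (mb s + 1) := (brd_snoc_iff s c hblt).mpr ⟨hbb, hc⟩
    have hle : mb s + 1 ≤ mb (s ++ [c]) := le_mb _ h1 (by rw [hauxlen]; omega)
    have hge : mb (s ++ [c]) ≤ mb s + 1 := by
      rcases Nat.eq_zero_or_pos (mb (s ++ [c])) with h0 | hpos
      · omega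
      · obtain ⟨j, hj⟩ : ∃ j, mb (s ++ [c]) = j + 1 :=
          ⟨mb (s ++ [c]) - 1, by omega⟩
        have hjlt : j < s.length := by
          have := mb_lt (s ++ [c]) hauxne; rw [hauxlen] at this; omega
        obtain ⟨hbj, _⟩ := (brd_snoc_iff s c hjlt).mp (hj ▸ brd_mb (s ++ [c]))
        have := le_mb s hbj hjlt
        omega
    omega
  case isFalse hc =>
    have hlt : (s.take (mb s)).length = mb s := by simp; omega
    apply Nat.le_antisymm
    · rcases Nat.eq_zero_or_pos (mb (s ++ [c])) with h0 | hpos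
      · omega
      obtain ⟨j, hj⟩ : ∃ j, mb (s ++ [c]) = j + 1 := ⟨mb (s ++ [c]) - 1, by omega⟩
      have hjlt : j < s.length := by
        have := mb_lt (s ++ [c]) hauxne; rw [hauxlen] at this; omega
      obtain ⟨hbj, hcj⟩ := (brd_snoc_iff s c hjlt).mp (hj ▸ brd_mb (s ++ [c]))
      have hjb : j ≤ mb s := le_mb s hbj hjlt
      have hjne : j ≠ mb s := by rintro rfl; exact hc hcj
      have hbt : Brd (s.take (mb s)) j := brd_chain_down s hbb (by omega) hbj (by omega)
      have hct : (s.take (mb s))[j]? = some c := by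
        rw [List.getElem?_take_of_lt (by omega)]; exact hcj
      have h3 : Brd (s.take (mb s) ++ [c]) (j + 1) :=
        (brd_snoc_iff (s.take (mb s)) c (by omega)).mpr ⟨hbt, hct⟩
      have : j + 1 ≤ mb (s.take (mb s) ++ [c]) := le_mb _ h3 (by simp [hlt]; omega)
      omega
    · rcases Nat.eq_zero_or_pos (mb (s.take (mb s) ++ [c])) with h0 | hpos
      · omega
      obtain ⟨j, hj⟩ : ∃ j, mb (s.take (mb s) ++ [c]) = j + 1 :=
        ⟨mb (s.take (mb s) ++ [c]) - 1, by omega⟩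
      have hjlt : j < mb s := by
        have := mb_lt (s.take (mb s) ++ [c]) (by simp)
        rw [List.length_append, List.length_singleton, hlt] at this
        omega
      obtain ⟨hbt, hct⟩ :=
        (brd_snoc_iff (s.take (mb s)) c (by omega)).mp (hj ▸ brd_mb (s.take (mb s) ++ [c]))
      have hbs : Brd s j := brd_chain_up s hbb (by omega) hbt (by omega)
      have hcs : s[j]? = some c := by
        rw [← List.getElem?_take_of_lt (j := mb s) (by omega)]; exact hct
      have h3 : Brd (s ++ [c]) (j + 1) := (brd_snoc_iff s c (by omega)).mpr ⟨hbs, hcs⟩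
      have : j + 1 ≤ mb (s ++ [c]) := le_mb _ h3 (by rw [hauxlen]; omega)
      omega

lemma pvA_while_getD (aux : List Char) (k : Nat) :
    (pvA_while aux k).getD 0 = (mbFrom aux k : Int) := by
  induction k with
  | zero => simp [pvA_while, mbFrom]
  | succ k ih =>
    simp only [pvA_while, mbFrom]
    split
    · simp
    · exact ih

lemma pvA_fill_eq (p : List Char) (row : Nat) (c : Char) (hrow : row ≤ p.length) :
    pvA_fill p row c = (mb (p.take row ++ [c]) : Int) := by
  have hlaux : (p.take row ++ [c]).length = row + 1 := by simp; omega
  have hmb : mb (p.take row ++ [c]) = mbFrom (p.take row ++ [c]) row := by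
    rw [mb, hlaux, Nat.add_sub_cancel]
  simp only [pvA_fill]
  rw [hlaux, Nat.add_sub_cancel]
  by_cases h0 : row = 0
  · rw [if_pos h0, h0, mb_short _ (by simp)]
    rfl
  · rw [if_neg h0, pvA_while_getD, hmb]

lemma cellA_eq (p : List Char) (row : Nat) (c : Char) (hrow : row ≤ p.length) :
    pvA_cell p row c = cellStd p row c := by
  by_cases h1 : row < p.length
  · by_cases h2 : some c = p[row]?
    · simp only [pvA_cell, cellStd]
      rw [if_pos h1, if_pos h2, if_pos ⟨h1, h2⟩]
    · by_cases h3 : row = 0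
      · simp only [pvA_cell, cellStd]
        rw [if_pos h1, if_neg h2, if_pos h3, if_neg (by tauto),
          h3, mb_short _ (by simp)]
        rfl
      · simp only [pvA_cell, cellStd]
        rw [if_pos h1, if_neg h2, if_neg h3, if_neg (by tauto)]
        exact pvA_fill_eq p row c hrow
  · simp only [pvA_cell, cellStd]
    rw [if_neg h1, if_neg (by tauto)]
    exact pvA_fill_eq p row c hrow

-- A's port is the cellStd matrix
lemma portA_eq (P alphabet : String) :
    createTransitionMatrix P alphabet =
      (List.range (P.toList.length + 1)).map (fun row =>
        alphabet.toList.map (fun c => cellStd P.toList row c)) := by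
  unfold createTransitionMatrix
  refine List.map_congr_left (fun row hrow => ?_)
  have h : row ≤ P.toList.length := by have := List.mem_range.mp hrow; omega
  exact List.map_congr_left (fun c _ => cellA_eq _ _ _ h)

-- the fallback identity at the cell level
lemma cellStd_fallback (p : List Char) (q : Nat) (c : Char) (hq1 : 1 ≤ q)
    (hq : q ≤ p.length) :
    cellStd p q c =
      if q < p.length ∧ some c = p[q]? then (q : Int) + 1
      else cellStd p (mb (p.take q)) c := by
  have hslen : (p.take q).length = q := by simp; omega
  have hsne : p.take q ≠ [] := by
    intro h; rw [h] at hslen; simp at hslen; omega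
  have hblt : mb (p.take q) < q := by have := mb_lt _ hsne; omega
  have hkey := mb_snoc (p.take q) c hsne
  have e1 : (p.take q)[mb (p.take q)]? = p[mb (p.take q)]? :=
    List.getElem?_take_of_lt hblt
  have e2 : (p.take q).take (mb (p.take q)) = p.take (mb (p.take q)) := by
    rw [List.take_take]; congr 1; omega
  rw [e1, e2] at hkey
  unfold cellStd
  split
  · rfl
  · rw [hkey]
    by_cases hcb : some c = p[mb (p.take q)]?
    · rw [if_pos hcb.symm, if_pos ⟨by omega, hcb⟩]
      push_cast; ring
    · rw [if_neg (fun h => hcb h.symm), if_neg (fun h => hcb h.2)]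

-- B's descent loop maintains the invariant J and exits at a matching/zero state
lemma pvB_desc_spec (p : List Char) (pf : List Nat) (q : Nat) (c : Char)
    (hq : q ≤ p.length)
    (hpi : ∀ j, j ≤ q → pf.getD j 0 = mb (p.take j)) :
    ∀ fuel k, k ≤ fuel → k < q →
      (mb (p.take q ++ [c]) =
        if (p.take q)[k]? = some c then k + 1 else mb (p.take k ++ [c])) →
      (pvB_desc p pf c fuel k < q ∧
       (mb (p.take q ++ [c]) =
         if (p.take q)[pvB_desc p pf c fuel k]? = some c then pvB_desc p pf c fuel k + 1
         else mb (p.take (pvB_desc p pf c fuel k) ++ [c])) ∧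
       (pvB_desc p pf c fuel k = 0 ∨ p.getD (pvB_desc p pf c fuel k) ' ' = c)) := by
  intro fuel
  induction fuel with
  | zero =>
    intro k hk hkq hJ
    have hk0 : k = 0 := by omega
    subst hk0
    refine ⟨by simpa [pvB_desc] using hkq, by simpa [pvB_desc] using hJ,
      Or.inl (by simp [pvB_desc])⟩
  | succ fuel ih =>
    intro k hk hkq hJ
    simp only [pvB_desc]
    split
    case isTrue hcond =>
      obtain ⟨hk0, hne⟩ := hcond
      have hkpos : 1 ≤ k := Nat.pos_of_ne_zero hk0
      have hklen : k < p.length := by omega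
      have htklen : (p.take k).length = k := by simp; omega
      have htkne : p.take k ≠ [] := by
        intro h; rw [h] at htklen; simp at htklen; omega
      have hk' : mb (p.take k) < k := by have := mb_lt _ htkne; omega
      have hgetd : pf.getD k 0 = mb (p.take k) := hpi k (by omega)
      have hsk : (p.take q)[k]? = some (p.getD k ' ') := by
        rw [List.getElem?_take_of_lt hkq, List.getElem?_eq_getElem hklen,
          List.getD_eq_getElem p ' ' hklen]
      have hmis : ¬ ((p.take q)[k]? = some c) := by
        rw [hsk]; intro h; exact hne (Option.some_inj.mp h)
      rw [if_neg hmis] at hJ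
      have hkey := mb_snoc (p.take k) c htkne
      have e1 : (p.take k)[mb (p.take k)]? = (p.take q)[mb (p.take k)]? := by
        rw [List.getElem?_take_of_lt hk', List.getElem?_take_of_lt (by omega)]
      have e2 : (p.take k).take (mb (p.take k)) = p.take (mb (p.take k)) := by
        rw [List.take_take]; congr 1; omega
      rw [e1, e2] at hkey
      have hJ' : mb (p.take q ++ [c]) =
          if (p.take q)[mb (p.take k)]? = some c then mb (p.take k) + 1
          else mb (p.take (mb (p.take k)) ++ [c]) := by rw [hJ, hkey]
      rw [hgetd]
      exact ih _ (by omega) (by omega) hJ'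
    case isFalse hcond =>
      refine ⟨hkq, hJ, ?_⟩
      rcases not_and_or.mp hcond with h | h
      · exact Or.inl (not_not.mp h)
      · exact Or.inr (not_not.mp h)

-- one full iteration of B's prefix loop computes mb of the next prefix
lemma pvB_step_core (p : List Char) (pf : List Nat) (q : Nat) (c : Char)
    (hq1 : 1 ≤ q) (hq : q ≤ p.length)
    (hpi : ∀ j, j ≤ q → pf.getD j 0 = mb (p.take j)) :
    (if c = p.getD (pvB_desc p pf c (mb (p.take q)) (mb (p.take q))) ' '
     then pvB_desc p pf c (mb (p.take q)) (mb (p.take q)) + 1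
     else pvB_desc p pf c (mb (p.take q)) (mb (p.take q))) = mb (p.take q ++ [c]) := by
  have hslen : (p.take q).length = q := by simp; omega
  have hsne : p.take q ≠ [] := by
    intro h; rw [h] at hslen; simp at hslen; omega
  have hblt : mb (p.take q) < q := by have := mb_lt _ hsne; omega
  have hkey := mb_snoc (p.take q) c hsne
  have e2 : (p.take q).take (mb (p.take q)) = p.take (mb (p.take q)) := by
    rw [List.take_take]; congr 1; omega
  rw [e2] at hkey
  obtain ⟨hr, hJr, hexit⟩ :=
    pvB_desc_spec p pf q c hq hpi (mb (p.take q)) (mb (p.take q)) le_rfl hblt hkey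
  set r := pvB_desc p pf c (mb (p.take q)) (mb (p.take q)) with hrdef
  have hrlen : r < p.length := by omega
  by_cases hcr : c = p.getD r ' '
  · rw [if_pos hcr]
    have hsome : (p.take q)[r]? = some c := by
      rw [List.getElem?_take_of_lt hr, List.getElem?_eq_getElem hrlen,
        ← List.getD_eq_getElem p ' ' hrlen, ← hcr]
    rw [if_pos hsome] at hJr
    exact hJr.symm
  · rw [if_neg hcr]
    have h0 : r = 0 := by
      rcases hexit with h | h
      · exact h
      · exact absurd h.symm hcr
    have hs0 : ¬ ((p.take q)[r]? = some c) := by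
      rw [List.getElem?_take_of_lt hr, List.getElem?_eq_getElem hrlen,
        ← List.getD_eq_getElem p ' ' hrlen]
      intro h
      exact hcr (Option.some_inj.mp h).symm
    rw [if_neg hs0] at hJr
    rw [h0] at hJr
    rw [mb_short (p.take 0 ++ [c]) (by simp)] at hJr
    rw [h0]
    exact hJr.symm

-- B's prefix-loop invariant over range' q0 n
lemma pvB_piLoop_inv (p : List Char) :
    ∀ (n q0 : Nat) (st : List Nat × Nat), 1 ≤ q0 → q0 + n ≤ p.length →
      st.1.length = p.length + 1 →
      st.2 = mb (p.take q0) →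
      (∀ j, j ≤ q0 → st.1.getD j 0 = mb (p.take j)) →
      (((List.range' q0 n).foldl (pvB_piStep p) st).1.length = p.length + 1 ∧
       ((List.range' q0 n).foldl (pvB_piStep p) st).2 = mb (p.take (q0 + n)) ∧
       ∀ j, j ≤ q0 + n →
         ((List.range' q0 n).foldl (pvB_piStep p) st).1.getD j 0 = mb (p.take j)) := by
  intro n
  induction n with
  | zero =>
    intro q0 st h1 h2 h3 h4 h5
    simpa [List.range'] using ⟨h3, h4, h5⟩
  | succ n ih =>
    intro q0 st h1 h2 h3 h4 h5
    have hq0len : q0 < p.length := by omega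
    have hstep : pvB_piStep p st q0 =
        (st.1.set (q0 + 1) (mb (p.take (q0 + 1))), mb (p.take (q0 + 1))) := by
      have hcore := pvB_step_core p st.1 q0 (p.getD q0 ' ') h1 (by omega) h5
      rw [← h4] at hcore
      have htake : p.take (q0 + 1) = p.take q0 ++ [p.getD q0 ' '] := by
        rw [List.take_add_one, List.getElem?_eq_getElem hq0len,
          List.getD_eq_getElem p ' ' hq0len]
        rfl
      unfold pvB_piStep
      rw [htake, ← hcore]
    have hrange : List.range' q0 (n + 1) = q0 :: List.range' (q0 + 1) n := rfl
    rw [hrange]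
    simp only [List.foldl_cons, hstep]
    have := ih (q0 + 1) (st.1.set (q0 + 1) (mb (p.take (q0 + 1))), mb (p.take (q0 + 1)))
      (by omega) (by omega)
      (by simp [h3])
      rfl
      (by
        intro j hj
        rw [List.getD_eq_getElem?_getD, List.getElem?_set]
        by_cases hje : q0 + 1 = j
        · rw [if_pos hje, if_pos (by omega), ← hje]
          simp
        · rw [if_neg hje, ← List.getD_eq_getElem?_getD]
          exact h5 j (by omega))
    rw [show q0 + 1 + n = q0 + (n + 1) by omega] at this
    exact this

-- B's prefix function is mb on every prefix
lemma pvB_pi_spec (p : List Char) (hp : p ≠ []) :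
    ∀ j, j ≤ p.length → (pvB_pi p).getD j 0 = mb (p.take j) := by
  have hlen : 0 < p.length := List.length_pos_of_ne_nil hp
  have h := pvB_piLoop_inv p (p.length - 1) 1 (List.replicate (p.length + 1) 0, 0)
    le_rfl (by omega)
    (by simp)
    (by
      show (0 : Nat) = mb (p.take 1)
      rw [mb_short _ (by simp only [List.length_take]; omega)])
    (by
      intro j hj
      rw [List.getD_eq_getElem?_getD, List.getElem?_replicate, if_pos (by omega)]
      rw [mb_short _ (by simp only [List.length_take]; omega)]
      rfl)
  rw [show 1 + (p.length - 1) = p.length by omega] at h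
  exact fun j hj => h.2.2 j hj

-- row from zip(alphabet, alphabet-indexed fallback row)
lemma zip_map_row (g : Char → Int) (F : Char → Int → Int) :
    ∀ (al : List Char),
      ((al.zip (al.map g)).map (fun cv => F cv.1 cv.2)) = al.map (fun c => F c (g c)) := by
  intro al
  induction al with
  | nil => rfl
  | cons a al ih => simp [ih]

-- B's row loop builds the cellStd matrix
lemma pvB_rowLoop_inv (p al : List Char) (pf : List Nat)
    (hpf : ∀ j, j ≤ p.length → pf.getD j 0 = mb (p.take j)) :
    ∀ (n q0 : Nat), 1 ≤ q0 → q0 + n = p.length + 1 →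
      (List.range' q0 n).foldl (pvB_rowStep p al pf)
        ((List.range q0).map (fun r => al.map (fun c => cellStd p r c))) =
      (List.range (p.length + 1)).map (fun r => al.map (fun c => cellStd p r c)) := by
  intro n
  induction n with
  | zero =>
    intro q0 h1 h2
    have : q0 = p.length + 1 := by omega
    subst this
    rfl
  | succ n ih =>
    intro q0 h1 h2
    have hq0 : q0 ≤ p.length := by omega
    have hslen : (p.take q0).length = q0 := by simp; omega
    have hsne : p.take q0 ≠ [] := by
      intro h; rw [h] at hslen; simp at hslen; omega
    have hblt : mb (p.take q0) < q0 := by have := mb_lt _ hsne; omega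
    have hfb : ((List.range q0).map (fun r => al.map (fun c => cellStd p r c))).getD
        (pf.getD q0 0) [] = al.map (fun c => cellStd p (mb (p.take q0)) c) := by
      rw [hpf q0 hq0, List.getD_eq_getElem?_getD, List.getElem?_map,
        List.getElem?_range hblt]
      rfl
    have hrowq :
        (if q0 < p.length then
          (al.zip (al.map (fun c => cellStd p (mb (p.take q0)) c))).map
            (fun cv => if cv.1 = p.getD q0 ' ' then ((q0 : Int) + 1) else cv.2)
         else al.map (fun c => cellStd p (mb (p.take q0)) c)) =
        al.map (fun c => cellStd p q0 c) := by
      by_cases hqm : q0 < p.length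
      · rw [if_pos hqm,
          zip_map_row (fun c => cellStd p (mb (p.take q0)) c)
            (fun c v => if c = p.getD q0 ' ' then ((q0 : Int) + 1) else v) al]
        refine List.map_congr_left (fun c _ => ?_)
        rw [cellStd_fallback p q0 c h1 hq0]
        by_cases hcc : c = p.getD q0 ' '
        · rw [if_pos hcc, if_pos ?_]
          refine ⟨hqm, ?_⟩
          rw [List.getElem?_eq_getElem hqm, ← List.getD_eq_getElem p ' ' hqm, hcc]
        · rw [if_neg hcc, if_neg ?_]
          rintro ⟨-, hsome⟩
          apply hcc
          rw [List.getElem?_eq_getElem hqm, ← List.getD_eq_getElem p ' ' hqm] at hsome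
          exact Option.some_inj.mp hsome
      · rw [if_neg hqm]
        refine List.map_congr_left (fun c _ => ?_)
        rw [cellStd_fallback p q0 c h1 hq0, if_neg (by tauto)]
    have hstep : pvB_rowStep p al pf
        ((List.range q0).map (fun r => al.map (fun c => cellStd p r c))) q0 =
        (List.range (q0 + 1)).map (fun r => al.map (fun c => cellStd p r c)) := by
      simp only [pvB_rowStep]
      rw [hfb, hrowq, List.range_succ, List.map_append]
      rfl
    have hrange : List.range' q0 (n + 1) = q0 :: List.range' (q0 + 1) n := rfl
    rw [hrange, List.foldl_cons, hstep]
    exact ih (q0 + 1) (by omega) (by omega)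

-- B's port is the cellStd matrix
lemma portB_eq (P alphabet : String) :
    createTransitionMatrix_alt P alphabet =
      (List.range (P.toList.length + 1)).map (fun row =>
        alphabet.toList.map (fun c => cellStd P.toList row c)) := by
  simp only [createTransitionMatrix_alt]
  by_cases hm : P.toList.length = 0
  · rw [if_pos hm, hm]
    rw [show (0 : Nat) + 1 = 1 from rfl, List.range_one]
    simp only [List.map_cons, List.map_nil]
    congr 1
    refine List.map_congr_left (fun c _ => ?_)
    have h0 : mb (P.toList.take 0 ++ [c]) = 0 := mb_short _ (by simp)
    rw [cellStd, if_neg (by simp [hm]), h0]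
    rfl
  · rw [if_neg hm]
    have hp : P.toList ≠ [] := by
      intro h; rw [h] at hm; exact hm rfl
    have hrow0 : (alphabet.toList.map (fun c =>
        if c = P.toList.getD 0 ' ' then (1 : Int) else 0)) =
        alphabet.toList.map (fun c => cellStd P.toList 0 c) := by
      refine List.map_congr_left (fun c _ => ?_)
      have h0 : 0 < P.toList.length := by omega
      rw [cellStd]
      by_cases hcc : c = P.toList.getD 0 ' '
      · rw [if_pos hcc, if_pos ?_]
        · rfl
        refine ⟨h0, ?_⟩
        rw [List.getElem?_eq_getElem h0, ← List.getD_eq_getElem _ ' ' h0, hcc]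
      · rw [if_neg hcc, if_neg ?_, mb_short _ (by simp)]
        · rfl
        rintro ⟨-, hsome⟩
        apply hcc
        rw [List.getElem?_eq_getElem h0, ← List.getD_eq_getElem _ ' ' h0] at hsome
        exact Option.some_inj.mp hsome
    rw [hrow0]
    have hinit : [alphabet.toList.map (fun c => cellStd P.toList 0 c)] =
        (List.range 1).map (fun r =>
          alphabet.toList.map (fun c => cellStd P.toList r c)) := by
      simp
    rw [hinit]
    exact pvB_rowLoop_inv P.toList alphabet.toList (pvB_pi P.toList)
      (pvB_pi_spec P.toList hp) P.toList.length 1 le_rfl (by omega)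

-- ===== VERDICT (by name: the statement is the Claim_ definition above) =====
theorem createTransitionMatrix_spec : Claim_equal_createTransitionMatrix := by
  intro P alphabet _
  show createTransitionMatrix P alphabet = createTransitionMatrix_alt P alphabet
  rw [portA_eq, portB_eq]
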